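-- pv_equiv track=rewrite | github.com/Marastraluster/CrossDesert | code/fifth.py | optimize_resources
-- ===== SOURCE A (Python) =====
-- weather_list = [0, 1, 0, 0, 0, 0, 1, 1, 1, 1]
--
-- base_c_water = [3, 9, 10]
--
-- base_c_food = [4, 9, 10]
--
-- def optimize_resources(daily_nodes, daily_actions, collision_tolerance=0):
--     """
--     根据动作序列，计算最低存活所需物资。
--     collision_tolerance: 容忍几次被踩踏(2k倍消耗)。0表示赌绝对不重合，1表示预防1次重合。
--     """
--     req_w, req_f = 0, 0
--     tolerance_left = collision_tolerance
--
--     for t in range(10):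
--         w_type = weather_list[t]
--         act = daily_actions[t]
--
--         mult = 1
--         if act == 'move':
--             # 如果还有容错额度，按碰撞(4倍)计算，否则按单人(2倍)计算
--             if tolerance_left > 0:
--                 mult = 4
--                 tolerance_left -= 1
--             else:
--                 mult = 2
--         elif act == 'mine':
--             mult = 3
--
--         req_w += mult * base_c_water[w_type]
--         req_f += mult * base_c_food[w_type]
--
--     return req_w, req_f
-- ===== SOURCE B (Python) =====
-- weather_list = [0, 1, 0, 0, 0, 0, 1, 1, 1, 1]
--
-- base_c_water = [3, 9, 10]
--
-- base_c_food = [4, 9, 10]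
--
-- def optimize_resources(daily_nodes, daily_actions, collision_tolerance=0):
--     req_w, req_f = 0, 0
--     for t in range(10):
--         act = daily_actions[t]
--         base = 2 if act == 'move' else 3 if act == 'mine' else 1
--         req_w += base * base_c_water[weather_list[t]]
--         req_f += base * base_c_food[weather_list[t]]
--     move_days = [t for t in range(10) if daily_actions[t] == 'move']
--     k = max(0, collision_tolerance)
--     for t in move_days[:k]:
--         req_w += 2 * base_c_water[weather_list[t]]
--         req_f += 2 * base_c_food[weather_list[t]]
--     return req_w, req_f
-- ===== Notes on version B (the rewrite author's own statement) =====
-- stated objective: alternative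
-- what changed: Replaces A's single fused loop with a decrementing tolerance counter by two passes: a base-cost pass (move=2x, mine=3x, else 1x) plus a penalty pass that adds 2x base costs for the first max(0, collision_tolerance) move days.
import Mathlib
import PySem

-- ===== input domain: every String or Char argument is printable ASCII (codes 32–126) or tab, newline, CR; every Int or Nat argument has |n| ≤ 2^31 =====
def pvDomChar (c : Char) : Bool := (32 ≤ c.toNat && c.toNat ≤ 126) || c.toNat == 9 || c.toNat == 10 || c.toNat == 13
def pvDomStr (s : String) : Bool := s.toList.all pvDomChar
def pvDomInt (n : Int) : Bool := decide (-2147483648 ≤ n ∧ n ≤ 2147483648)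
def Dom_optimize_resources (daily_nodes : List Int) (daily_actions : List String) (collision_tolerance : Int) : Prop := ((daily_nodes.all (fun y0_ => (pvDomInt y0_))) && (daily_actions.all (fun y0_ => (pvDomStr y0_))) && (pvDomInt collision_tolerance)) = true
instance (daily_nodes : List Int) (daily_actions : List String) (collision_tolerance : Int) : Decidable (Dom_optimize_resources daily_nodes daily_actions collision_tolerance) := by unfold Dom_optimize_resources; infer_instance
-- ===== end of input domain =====

-- B replaces A's fused decrementing-tolerance loop by a base-cost pass plus a penalty
-- pass over the first max(0, tolerance) move days (objective: alternative decomposition).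

-- module constants
def weatherL : List Int := [0, 1, 0, 0, 0, 0, 1, 1, 1, 1]
def base_c_waterL : List Int := [3, 9, 10]
def base_c_foodL : List Int := [4, 9, 10]

-- ===== PORT A =====
def optimize_resources (daily_nodes : List Int) (daily_actions : List String) (collision_tolerance : Int) : Int × Int :=
  -- state (req_w, req_f, tolerance_left), loop for t in range(10)
  let s := (PySem.List.pyRange 0 10 1).foldl (fun (s : Int × Int × Int) t =>
    let w_type := PySem.List.pyGetD weatherL t 0
    let act := PySem.List.pyGetD daily_actions t ""
    let mt : Int × Int :=
      if act == "move" then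
        (if s.2.2 > 0 then (4, s.2.2 - 1) else (2, s.2.2))
      else if act == "mine" then (3, s.2.2)
      else (1, s.2.2)
    (s.1 + mt.1 * PySem.List.pyGetD base_c_waterL w_type 0,
     s.2.1 + mt.1 * PySem.List.pyGetD base_c_foodL w_type 0,
     mt.2)) (0, 0, collision_tolerance)
  (s.1, s.2.1)

-- ===== PORT B =====
def optimize_resources_alt (daily_nodes : List Int) (daily_actions : List String) (collision_tolerance : Int) : Int × Int :=
  let base := (PySem.List.pyRange 0 10 1).foldl (fun (s : Int × Int) t =>
    let act := PySem.List.pyGetD daily_actions t ""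
    let b : Int := if act == "move" then 2 else if act == "mine" then 3 else 1
    (s.1 + b * PySem.List.pyGetD base_c_waterL (PySem.List.pyGetD weatherL t 0) 0,
     s.2 + b * PySem.List.pyGetD base_c_foodL (PySem.List.pyGetD weatherL t 0) 0)) (0, 0)
  let move_days := (PySem.List.pyRange 0 10 1).filter
    (fun t => PySem.List.pyGetD daily_actions t "" == "move")
  let k : Int := max 0 collision_tolerance
  (PySem.List.slice move_days none (some k)).foldl (fun (s : Int × Int) t =>
    (s.1 + 2 * PySem.List.pyGetD base_c_waterL (PySem.List.pyGetD weatherL t 0) 0,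
     s.2 + 2 * PySem.List.pyGetD base_c_foodL (PySem.List.pyGetD weatherL t 0) 0)) base

-- ===== PRECONDITION & SPEC =====
-- Python A indexes daily_actions[t] for t in range(10): it raises IndexError when fewer
-- than 10 actions are given, so Pre_ requires at least 10 actions.
def Pre_optimize_resources (daily_nodes : List Int) (daily_actions : List String) (collision_tolerance : Int) : Prop :=
  10 ≤ daily_actions.length
instance (daily_nodes : List Int) (daily_actions : List String) (collision_tolerance : Int) : Decidable (Pre_optimize_resources daily_nodes daily_actions collision_tolerance) := by unfold Pre_optimize_resources; infer_instance

def pvWitness_optimize_resources : List Int × List String × Int :=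
  ([], ["move", "mine", "rest", "rest", "move", "mine", "rest", "move", "rest", "rest"], 2)

def Spec_optimize_resources (daily_nodes : List Int) (daily_actions : List String) (collision_tolerance : Int) (out : Int × Int) : Prop := out = optimize_resources_alt daily_nodes daily_actions collision_tolerance
instance (daily_nodes : List Int) (daily_actions : List String) (collision_tolerance : Int) (out : Int × Int) : Decidable (Spec_optimize_resources daily_nodes daily_actions collision_tolerance out) := by unfold Spec_optimize_resources; infer_instance

-- ===== CLAIM (what is proved, stated in full; the proofs are below) =====
def Claim_equal_optimize_resources : Prop := ∀ (daily_nodes : List Int) (daily_actions : List String) (collision_tolerance : Int), Dom_optimize_resources daily_nodes daily_actions collision_tolerance → Pre_optimize_resources daily_nodes daily_actions collision_tolerance → Spec_optimize_resources daily_nodes daily_actions collision_tolerance (optimize_resources daily_nodes daily_actions collision_tolerance)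

-- ===== LEMMAS AND PROOFS =====

-- abbreviations for the per-day costs and the "move" test
def cwat (t : Int) : Int := PySem.List.pyGetD base_c_waterL (PySem.List.pyGetD weatherL t 0) 0
def cfod (t : Int) : Int := PySem.List.pyGetD base_c_foodL (PySem.List.pyGetD weatherL t 0) 0
def isMove (da : List String) (t : Int) : Bool := PySem.List.pyGetD da t "" == "move"

-- A's accumulated water/food totals over an arbitrary index list, with tolerance
def AW (da : List String) : List Int → Int → Int
  | [], _ => 0
  | t :: ts, tol =>
    if isMove da t then
      (if tol > 0 then 4 * cwat t + AW da ts (tol - 1) else 2 * cwat t + AW da ts tol)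
    else if PySem.List.pyGetD da t "" == "mine" then 3 * cwat t + AW da ts tol
    else cwat t + AW da ts tol

def AF (da : List String) : List Int → Int → Int
  | [], _ => 0
  | t :: ts, tol =>
    if isMove da t then
      (if tol > 0 then 4 * cfod t + AF da ts (tol - 1) else 2 * cfod t + AF da ts tol)
    else if PySem.List.pyGetD da t "" == "mine" then 3 * cfod t + AF da ts tol
    else cfod t + AF da ts tol

def TolA (da : List String) : List Int → Int → Int
  | [], tol => tol
  | t :: ts, tol =>
    if isMove da t ∧ tol > 0 then TolA da ts (tol - 1) else TolA da ts tol

-- B's base totals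
def BW (da : List String) : List Int → Int
  | [] => 0
  | t :: ts =>
    (if isMove da t then 2 * cwat t else if PySem.List.pyGetD da t "" == "mine" then 3 * cwat t else cwat t) + BW da ts
def BF (da : List String) : List Int → Int
  | [] => 0
  | t :: ts =>
    (if isMove da t then 2 * cfod t else if PySem.List.pyGetD da t "" == "mine" then 3 * cfod t else cfod t) + BF da ts

-- penalty totals over a list of move days
def PW : List Int → Int
  | [] => 0
  | t :: ts => 2 * cwat t + PW ts
def PF : List Int → Int
  | [] => 0
  | t :: ts => 2 * cfod t + PF ts

lemma a_fold (da : List String) (ts : List Int) : ∀ (w f tol : Int),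
    ts.foldl (fun (s : Int × Int × Int) t =>
      let w_type := PySem.List.pyGetD weatherL t 0
      let act := PySem.List.pyGetD da t ""
      let mt : Int × Int :=
        if act == "move" then
          (if s.2.2 > 0 then (4, s.2.2 - 1) else (2, s.2.2))
        else if act == "mine" then (3, s.2.2)
        else (1, s.2.2)
      (s.1 + mt.1 * PySem.List.pyGetD base_c_waterL w_type 0,
       s.2.1 + mt.1 * PySem.List.pyGetD base_c_foodL w_type 0,
       mt.2)) (w, f, tol)
    = (w + AW da ts tol, f + AF da ts tol, TolA da ts tol) := by
  induction ts with
  | nil => intro w f tol; simp [AW, AF, TolA]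
  | cons t ts ih =>
    intro w f tol
    rw [List.foldl_cons]
    by_cases hm : (PySem.List.pyGetD da t "" == "move") = true
    · by_cases ht : tol > 0
      · simp only [hm, if_pos, ht, ih]
        simp only [AW, AF, TolA, isMove, cwat, cfod, hm, ht, if_pos]
        simp [Prod.ext_iff]; omega
      · simp only [hm, if_pos, ht, ih]
        simp only [AW, AF, TolA, isMove, cwat, cfod, hm, ht, if_pos]
        simp [Prod.ext_iff]; omega
    · by_cases hn : (PySem.List.pyGetD da t "" == "mine") = true
      · simp only [hm, hn, ih]
        simp only [AW, AF, TolA, isMove, cwat, cfod, hm, hn]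
        simp [hm, hn, Prod.ext_iff]; omega
      · simp only [hm, hn, ih]
        simp only [AW, AF, TolA, isMove, cwat, cfod, hm, hn]
        simp [hm, hn, Prod.ext_iff]; omega

lemma b_base_fold (da : List String) (ts : List Int) : ∀ (w f : Int),
    ts.foldl (fun (s : Int × Int) t =>
      let act := PySem.List.pyGetD da t ""
      let b : Int := if act == "move" then 2 else if act == "mine" then 3 else 1
      (s.1 + b * PySem.List.pyGetD base_c_waterL (PySem.List.pyGetD weatherL t 0) 0,
       s.2 + b * PySem.List.pyGetD base_c_foodL (PySem.List.pyGetD weatherL t 0) 0)) (w, f)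
    = (w + BW da ts, f + BF da ts) := by
  induction ts with
  | nil => intro w f; simp [BW, BF]
  | cons t ts ih =>
    intro w f
    rw [List.foldl_cons]
    simp only [ih]
    simp only [BW, BF, isMove, cwat, cfod]
    by_cases hm : (PySem.List.pyGetD da t "" == "move") = true
    · simp [hm, Prod.ext_iff]; omega
    · by_cases hn : (PySem.List.pyGetD da t "" == "mine") = true
      · simp [hm, hn, Prod.ext_iff]; omega
      · simp [hm, hn, Prod.ext_iff]; omega

lemma b_pen_fold (l : List Int) : ∀ (w f : Int),
    l.foldl (fun (s : Int × Int) t =>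
      (s.1 + 2 * PySem.List.pyGetD base_c_waterL (PySem.List.pyGetD weatherL t 0) 0,
       s.2 + 2 * PySem.List.pyGetD base_c_foodL (PySem.List.pyGetD weatherL t 0) 0)) (w, f)
    = (w + PW l, f + PF l) := by
  induction l with
  | nil => intro w f; simp [PW, PF]
  | cons t ts ih =>
    intro w f
    rw [List.foldl_cons, ih]
    simp only [PW, PF, cwat, cfod]
    simp [Prod.ext_iff]; omega

-- key decomposition: A's total = B's base + penalty over first (max 0 tol) move days
lemma key_w (da : List String) (ts : List Int) : ∀ (tol : Int),
    AW da ts tol = BW da ts + PW ((ts.filter (isMove da)).take (max 0 tol).toNat) := by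
  induction ts with
  | nil => intro tol; simp [AW, BW, PW]
  | cons t ts ih =>
    intro tol
    by_cases hm : isMove da t = true
    · rw [List.filter_cons_of_pos hm]
      by_cases ht : tol > 0
      · have hnat : (max 0 tol).toNat = (max 0 (tol - 1)).toNat + 1 := by omega
        rw [hnat, List.take_succ_cons]
        have h2 := ih (tol - 1)
        simp only [AW, BW, PW, isMove] at *
        simp [hm, ht, cwat] at *
        omega
      · have hnat : (max 0 tol).toNat = 0 := by omega
        rw [hnat, List.take_zero]
        have h2 := ih tol
        rw [hnat, List.take_zero] at h2
        simp only [AW, BW, PW, isMove] at *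
        simp [hm, ht] at *
        omega
    · rw [List.filter_cons_of_neg (by simpa using hm)]
      have h2 := ih tol
      simp only [AW, BW, isMove] at *
      by_cases hn : (PySem.List.pyGetD da t "" == "mine") = true
      · simp [hm, hn] at *; omega
      · simp [hm, hn] at *; omega

lemma key_f (da : List String) (ts : List Int) : ∀ (tol : Int),
    AF da ts tol = BF da ts + PF ((ts.filter (isMove da)).take (max 0 tol).toNat) := by
  induction ts with
  | nil => intro tol; simp [AF, BF, PF]
  | cons t ts ih =>
    intro tol
    by_cases hm : isMove da t = true
    · rw [List.filter_cons_of_pos hm]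
      by_cases ht : tol > 0
      · have hnat : (max 0 tol).toNat = (max 0 (tol - 1)).toNat + 1 := by omega
        rw [hnat, List.take_succ_cons]
        have h2 := ih (tol - 1)
        simp only [AF, BF, PF, isMove] at *
        simp [hm, ht, cfod] at *
        omega
      · have hnat : (max 0 tol).toNat = 0 := by omega
        rw [hnat, List.take_zero]
        have h2 := ih tol
        rw [hnat, List.take_zero] at h2
        simp only [AF, BF, PF, isMove] at *
        simp [hm, ht] at *
        omega
    · rw [List.filter_cons_of_neg (by simpa using hm)]
      have h2 := ih tol
      simp only [AF, BF, isMove] at *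
      by_cases hn : (PySem.List.pyGetD da t "" == "mine") = true
      · simp [hm, hn] at *; omega
      · simp [hm, hn] at *; omega

theorem ports_agree (daily_nodes : List Int) (daily_actions : List String) (collision_tolerance : Int) :
    optimize_resources daily_nodes daily_actions collision_tolerance
    = optimize_resources_alt daily_nodes daily_actions collision_tolerance := by
  have hk : (0 : Int) ≤ max 0 collision_tolerance := le_max_left _ _
  simp only [optimize_resources, optimize_resources_alt, a_fold, b_base_fold,
    PySem.List.slice_to _ hk, b_pen_fold, key_w, key_f]
  unfold isMove
  simp only [Prod.ext_iff]
  constructor <;> omega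

-- ===== VERDICT (by name: the statement is the Claim_ definition above) =====
theorem optimize_resources_spec : Claim_equal_optimize_resources := by
  intro dn da ct _ _
  unfold Spec_optimize_resources
  exact ports_agree dn da ct
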